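-- pv_equiv track=rewrite | github.com/46112/Coding-Chanllenges | Programmers/LV2_n진수 게임.py | solution
-- ===== SOURCE A (Python) =====
-- def solution(n, t, m, p):
--     tube = []
--     cur_num = 0
--     cur_order = 1
--     while(len(tube) < t):
--         cur_str = convertToNBase(cur_num, n)
--         for c in cur_str:
--             if cur_order == p:
--                 tube.append(c)
--                 if (len(tube) >= t):
--                     break
--             cur_order += 1
--             cur_order = m if cur_order % m == 0 else cur_order % m
--         cur_num += 1
--
--     answer = "".join(tube)
--     return answer
--
-- def convertToNBase(number, N):
--     num_dict = {10: 'A', 11: 'B', 12: 'C', 13: 'D', 14: 'E', 15: 'F'}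
--     rev_base = ''
--     if(number == 0):
--         return '0'
--
--     while number > 0:
--         number, mod = divmod(number, N)
--         if(mod >= 10):
--             mod = num_dict[mod]
--         rev_base += str(mod)
--
--     return rev_base[::-1]
-- ===== SOURCE B (Python) =====
-- def toBase(i, n):
--     s = ""
--     while True:
--         i, r = divmod(i, n)
--         s = "0123456789ABCDEF"[r] + s
--         if i == 0:
--             return s
--
--
-- def solution(n, t, m, p):
--     if t <= 0:
--         return ""
--     need = p + (t - 1) * m
--     seq = []
--     i = 0
--     while len(seq) < need:
--         seq.extend(toBase(i, n))
--         i += 1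
--     return "".join(seq[p - 1 + j * m] for j in range(t))
-- ===== Notes on version B (the rewrite author's own statement) =====
-- stated objective: simpler
-- what changed: B drops A's rotating cur_order counter and per-character conditional append: it computes in closed form how many digits are needed (p + (t-1)*m), generates base-n representations of 0,1,2,... until the digit sequence is that long, and then reads the answer off by the index formula seq[p-1+j*m] for j in range(t); the digit helper builds the string by prepending instead of append-then-reverse with a dict.
-- outside the precondition, e.g. on solution(0, 1, 1, 1): A returns '0', B raises ZeroDivisionError
import Mathlib
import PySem

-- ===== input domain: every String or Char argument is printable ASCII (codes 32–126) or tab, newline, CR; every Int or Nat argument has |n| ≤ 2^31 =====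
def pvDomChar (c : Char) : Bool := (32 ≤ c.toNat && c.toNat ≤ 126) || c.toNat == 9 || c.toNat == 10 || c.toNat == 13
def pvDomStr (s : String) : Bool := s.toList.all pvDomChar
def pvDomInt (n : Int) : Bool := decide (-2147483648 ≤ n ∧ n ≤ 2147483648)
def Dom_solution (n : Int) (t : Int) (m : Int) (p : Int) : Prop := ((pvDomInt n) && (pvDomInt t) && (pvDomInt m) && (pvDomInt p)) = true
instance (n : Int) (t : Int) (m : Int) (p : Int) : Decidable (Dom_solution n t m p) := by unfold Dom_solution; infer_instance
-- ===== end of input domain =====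

-- B replaces A's rotating pick counter by a closed-form digit count and stride indexing (objective: simpler).
-- Python strings are modelled as List Char throughout; ''.join of chars is String.ofList.

-- ===== PORT A =====
-- num_dict = {10:'A', …, 15:'F'}  (values are 1-char strings, modelled as List Char)
def pvNumDict : PySem.Dict Int (List Char) :=
  PySem.Dict.ofList [(10, ['A']), (11, ['B']), (12, ['C']), (13, ['D']), (14, ['E']), (15, ['F'])]

-- the 'while number > 0' loop of convertToNBase; fuel is a totality guard only
-- (number.toNat + 1 iterations always suffice on the admitted inputs).
-- num_dict[mod]: the KeyError case (digit ≥ 16, i.e. base > 16) is excluded by Pre_solution; .getD [] there.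
def pvConvLoopA (fuel : Nat) (number : Int) (N : Int) (rev : List Char) : List Char :=
  match fuel with
  | 0 => rev
  | f + 1 =>
    if 0 < number then
      let q := PySem.Int.floordiv number N
      let md := PySem.Int.mod number N
      let ds := if 10 ≤ md then PySem.Dict.getD pvNumDict md [] else PySem.Int.toChars md
      pvConvLoopA f q N (rev ++ ds)
    else rev

-- convertToNBase(number, N); rev_base[::-1] is reversal (PySem.List.slice? xs none none (-1) = xs.reverse)
def pvConvA (number : Int) (N : Int) : List Char :=
  if number == 0 then ['0']
  else (pvConvLoopA (number.toNat + 1) number N []).reverse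

-- cur_order update: cur_order = m if cur_order % m == 0 else cur_order % m
def pvStep (m : Int) (ord : Int) : Int :=
  let o := ord + 1
  if PySem.Int.mod o m == 0 then m else PySem.Int.mod o m

-- the inner 'for c in cur_str' loop with its break; returns (tube, cur_order)
def pvInner (t m p : Int) : List Char → List Char → Int → (List Char × Int)
  | [], tube, ord => (tube, ord)
  | c :: cs, tube, ord =>
    if ord == p then
      let tube' := tube ++ [c]
      if t ≤ (tube'.length : Int) then (tube', ord)
      else pvInner t m p cs tube' (pvStep m ord)
    else pvInner t m p cs tube (pvStep m ord)

-- the outer 'while len(tube) < t' loop; fuel is a totality guard only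
def pvOuter (n t m p : Int) (fuel : Nat) (tube : List Char) (curNum : Int) (ord : Int) : List Char :=
  match fuel with
  | 0 => tube
  | f + 1 =>
    if (tube.length : Int) < t then
      let r := pvInner t m p (pvConvA curNum n) tube ord
      pvOuter n t m p f r.1 (curNum + 1) r.2
    else tube

def solution (n : Int) (t : Int) (m : Int) (p : Int) : String :=
  String.ofList (pvOuter n t m p ((p + (t - 1) * m).toNat + 1) [] 0 1)

-- ===== PORT B =====
def pvDigits : List Char := ['0','1','2','3','4','5','6','7','8','9','A','B','C','D','E','F']

-- toBase's 'while True' loop; "0123456789ABCDEF"[r]: IndexError excluded by Pre_solution, .getD '?' there.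
-- fuel is a totality guard only (checked after the first iteration, matching the do-while shape).
def pvToBaseGo (fuel : Nat) (i : Int) (nb : Int) (acc : List Char) : List Char :=
  let q := PySem.Int.floordiv i nb
  let r := PySem.Int.mod i nb
  let acc' := (PySem.List.pyGet? pvDigits r).getD '?' :: acc
  if q == 0 then acc'
  else
    match fuel with
    | 0 => acc'
    | f + 1 => pvToBaseGo f q nb acc'

def pvToBase (i : Int) (nb : Int) : List Char := pvToBaseGo (i.toNat + 1) i nb []

-- 'while len(seq) < need' generation loop; fuel is a totality guard only
def pvBuild (n : Int) (need : Int) (fuel : Nat) (seq : List Char) (i : Int) : List Char :=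
  match fuel with
  | 0 => seq
  | f + 1 =>
    if (seq.length : Int) < need then
      pvBuild n need f (seq ++ pvToBase i n) (i + 1)
    else seq

def solution_alt (n : Int) (t : Int) (m : Int) (p : Int) : String :=
  if t ≤ 0 then ""
  else
    let need := p + (t - 1) * m
    let seq := pvBuild n need (need.toNat + 1) [] 0
    String.ofList ((PySem.List.pyRange 0 t 1).map
      (fun j => (PySem.List.pyGet? seq (p - 1 + j * m)).getD '?'))

-- ===== PRECONDITION & SPEC =====
-- Pre_ excludes bases outside 2..16 (where A's digit lookup raises KeyError, divmod raises
-- ZeroDivisionError, or the loop never terminates) and pick positions p outside 1..m (where A's scan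
-- never selects a digit and loops forever) — except when t ≤ 0, where A returns '' before touching
-- them; a few excluded inputs (e.g. n = 0 with t = m = p = 1) happen to return before the error.
def Pre_solution (n : Int) (t : Int) (m : Int) (p : Int) : Prop :=
  t ≤ 0 ∨ (2 ≤ n ∧ n ≤ 16 ∧ 1 ≤ p ∧ p ≤ m)
instance (n : Int) (t : Int) (m : Int) (p : Int) : Decidable (Pre_solution n t m p) := by
  unfold Pre_solution; infer_instance

def pvWitness_solution : Int × Int × Int × Int := (2, 4, 2, 1)

def Spec_solution (n : Int) (t : Int) (m : Int) (p : Int) (out : String) : Prop := out = solution_alt n t m p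
instance (n : Int) (t : Int) (m : Int) (p : Int) (out : String) : Decidable (Spec_solution n t m p out) := by
  unfold Spec_solution; infer_instance

-- ===== CLAIM (what is proved, stated in full; the proofs are below) =====
def Claim_equal_solution : Prop := ∀ (n : Int) (t : Int) (m : Int) (p : Int),
  Dom_solution n t m p → Pre_solution n t m p → Spec_solution n t m p (solution n t m p)

-- ===== LEMMAS AND PROOFS =====

-- the digit stream: concatenation of A's base-n representations of 0, 1, …, k-1
def pvLL (n : Int) (k : Nat) : List Char := (List.range k).flatMap (fun i => pvConvA (i : Int) n)

-- the selection A performs, expressed as a pure fold with the same step function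
def pvSel (m p : Int) (ord : Int) : List Char → List Char
  | [] => []
  | c :: cs => (if ord == p then [c] else []) ++ pvSel m p (pvStep m ord) cs

def pvOrdAfter (m : Int) (ord : Int) (cs : List Char) : Int := cs.foldl (fun o _ => pvStep m o) ord

-- cur_order value when the distance to the next picked position is d (0 ≤ d < m)
def pvOrdOfD (m p : Int) (d : Nat) : Int := if (d : Int) ≤ p - 1 then p - d else p + m - d

theorem pvConvLoopA_acc (f : Nat) : ∀ (i N : Int) (rev : List Char),
    pvConvLoopA f i N rev = rev ++ pvConvLoopA f i N [] := by
  induction f with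
  | zero => intro i N rev; simp [pvConvLoopA]
  | succ f ih =>
    intro i N rev
    simp only [pvConvLoopA]
    by_cases h : 0 < i
    · simp only [if_pos h]
      rw [ih _ _ (rev ++ _), ih _ _ ([] ++ _)]
      simp
    · simp [if_neg h]

theorem pvToBaseGo_acc (f : Nat) : ∀ (i nb : Int) (acc : List Char),
    pvToBaseGo f i nb acc = pvToBaseGo f i nb [] ++ acc := by
  induction f with
  | zero =>
    intro i nb acc
    simp only [pvToBaseGo]
    by_cases h : PySem.Int.floordiv i nb == 0 <;> simp [h]
  | succ f ih =>
    intro i nb acc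
    simp only [pvToBaseGo]
    by_cases h : PySem.Int.floordiv i nb == 0
    · simp [h]
    · simp only [h, if_neg, Bool.false_eq_true, if_false]
      rw [ih _ _ (_ :: acc), ih _ _ [_]]
      simp

theorem pvToBaseGo_len (f : Nat) : ∀ (i nb : Int) (acc : List Char),
    acc.length < (pvToBaseGo f i nb acc).length := by
  induction f with
  | zero =>
    intro i nb acc
    simp only [pvToBaseGo]
    by_cases h : PySem.Int.floordiv i nb == 0 <;> simp [h]
  | succ f ih =>
    intro i nb acc
    simp only [pvToBaseGo]
    by_cases h : PySem.Int.floordiv i nb == 0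
    · simp [h]
    · simp only [h, Bool.false_eq_true, if_false]
      exact Nat.lt_trans (by simp) (ih _ _ _)

theorem pvConvLoopA_zero (f : Nat) (N : Int) (rev : List Char) :
    pvConvLoopA f 0 N rev = rev := by
  cases f <;> simp [pvConvLoopA]

-- A's digit string for one digit value equals B's table lookup (0 ≤ r < 16)
theorem pvDigit_eq (r : Int) (h0 : 0 ≤ r) (h16 : r < 16) :
    (if 10 ≤ r then PySem.Dict.getD pvNumDict r [] else PySem.Int.toChars r)
      = [(PySem.List.pyGet? pvDigits r).getD '?'] := by
  interval_cases r <;> decide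

-- core: the two digit loops produce reverse lists of each other
theorem pvConv_core (n : Int) (hn2 : 2 ≤ n) (hn16 : n ≤ 16) :
    ∀ (k : Nat) (i : Int), 0 < i → i.toNat ≤ k →
    ∀ (f1 f2 : Nat), i.toNat ≤ f1 → i.toNat ≤ f2 →
    pvConvLoopA f1 i n [] = (pvToBaseGo f2 i n []).reverse := by
  intro k
  induction k with
  | zero => intro i hi hik; omega
  | succ k ih =>
    intro i hi hik f1 f2 hf1 hf2
    obtain ⟨f1', rfl⟩ : ∃ f1', f1 = f1' + 1 := ⟨f1 - 1, by omega⟩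
    obtain ⟨f2', rfl⟩ : ∃ f2', f2 = f2' + 1 := ⟨f2 - 1, by omega⟩
    have hq0 : 0 ≤ PySem.Int.floordiv i n :=
      (PySem.Int.le_floordiv_iff_mul_le (by omega)).mpr (by nlinarith)
    have hqlt : PySem.Int.floordiv i n < i :=
      (PySem.Int.floordiv_lt_iff_lt_mul (by omega)).mpr (by nlinarith)
    have hr0 : 0 ≤ PySem.Int.mod i n := PySem.Int.mod_nonneg _ (by omega)
    have hr16 : PySem.Int.mod i n < 16 := lt_of_lt_of_le (PySem.Int.mod_lt _ (by omega)) hn16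
    have hdig := pvDigit_eq (PySem.Int.mod i n) hr0 hr16
    simp only [pvConvLoopA, if_pos hi, List.nil_append]
    conv_rhs => rw [pvToBaseGo]
    by_cases hq : PySem.Int.floordiv i n == 0
    · have hq' : PySem.Int.floordiv i n = 0 := by simpa using hq
      simp only [hq', pvConvLoopA_zero, hq, if_pos]
      rw [hdig]
      simp
    · have hq' : 0 < PySem.Int.floordiv i n := by
        rcases lt_or_eq_of_le hq0 with h | h
        · exact h
        · exact absurd h.symm (by simpa using hq)
      simp only [hq, Bool.false_eq_true, if_false]
      rw [pvConvLoopA_acc, pvToBaseGo_acc]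
      rw [ih (PySem.Int.floordiv i n) hq' (by omega) f1' f2' (by omega) (by omega)]
      rw [hdig]
      simp

theorem pvConv_eq (n : Int) (hn2 : 2 ≤ n) (hn16 : n ≤ 16) (i : Int) (h0 : 0 ≤ i) :
    pvConvA i n = pvToBase i n := by
  by_cases hi : i = 0
  · subst hi
    have hq : PySem.Int.floordiv 0 n = 0 := by
      rw [PySem.Int.floordiv_eq_ediv_of_pos (by omega : (0:Int) < n)]; simp
    have hr : PySem.Int.mod 0 n = 0 := by
      rw [PySem.Int.mod_eq_emod_of_pos (by omega : (0:Int) < n)]; simp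
    simp only [pvConvA, pvToBase, pvToBaseGo, hq, hr]
    norm_num
    decide
  · have hi' : 0 < i := by omega
    have hne : (i == 0) = false := by simpa using hi
    simp only [pvConvA, pvToBase, hne, Bool.false_eq_true, if_false]
    rw [pvConv_core n hn2 hn16 i.toNat i hi' le_rfl (i.toNat + 1) (i.toNat + 1) (by omega) (by omega)]
    simp

theorem pvConvA_len (n : Int) (hn2 : 2 ≤ n) (hn16 : n ≤ 16) (i : Int) (h0 : 0 ≤ i) :
    1 ≤ (pvConvA i n).length := by
  rw [pvConv_eq n hn2 hn16 i h0]
  have := pvToBaseGo_len (i.toNat + 1) i n []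
  simpa [pvToBase] using this

theorem pvLL_succ (n : Int) (k : Nat) : pvLL n (k + 1) = pvLL n k ++ pvConvA (k : Int) n := by
  simp [pvLL, List.range_succ]

theorem pvLL_prefix (n : Int) {k k' : Nat} (h : k ≤ k') : pvLL n k <+: pvLL n k' := by
  induction k' with
  | zero => simp_all
  | succ k' ih =>
    by_cases hk : k = k' + 1
    · subst hk; exact List.prefix_refl _
    · exact (ih (by omega)).trans (by rw [pvLL_succ]; exact List.prefix_append _ _)

theorem pvPrefix_get? {α : Type} {xs ys : List α} (h : xs <+: ys) {i : Nat} (hi : i < xs.length) :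
    ys[i]? = xs[i]? := by
  obtain ⟨tl, rfl⟩ := h
  rw [List.getElem?_append_left hi]

theorem pvSel_append (m p : Int) : ∀ (xs ys : List Char) (ord : Int),
    pvSel m p ord (xs ++ ys) = pvSel m p ord xs ++ pvSel m p (pvOrdAfter m ord xs) ys := by
  intro xs
  induction xs with
  | nil => intro ys ord; simp [pvSel, pvOrdAfter]
  | cons c cs ih =>
    intro ys ord
    simp only [List.cons_append, pvSel, pvOrdAfter, List.foldl_cons]
    rw [ih ys (pvStep m ord)]
    simp [pvOrdAfter, List.append_assoc]

theorem pvOrdAfter_append (m : Int) (ord : Int) (xs ys : List Char) :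
    pvOrdAfter m ord (xs ++ ys) = pvOrdAfter m (pvOrdAfter m ord xs) ys := by
  simp [pvOrdAfter, List.foldl_append]

-- A's inner loop: it appends exactly the next picks (pvSel), truncated at t,
-- and when not filled it has threaded cur_order across all characters.
theorem pvInner_spec (t m p : Int) (ht : 1 ≤ t) : ∀ (cs tube : List Char) (ord : Int),
    (tube.length : Int) < t →
    (pvInner t m p cs tube ord).1 = tube ++ (pvSel m p ord cs).take (t.toNat - tube.length)
    ∧ (tube.length + (pvSel m p ord cs).length < t.toNat →
        (pvInner t m p cs tube ord).2 = pvOrdAfter m ord cs) := by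
  intro cs
  induction cs with
  | nil => intro tube ord h; simp [pvInner, pvSel, pvOrdAfter]
  | cons c cs ih =>
    intro tube ord h
    by_cases hp : ord == p
    · simp only [pvInner, hp, if_pos, pvSel, List.singleton_append]
      by_cases hbr : t ≤ ((tube ++ [c]).length : Int)
      · have hlen : t.toNat - tube.length = 1 := by
          simp only [List.length_append, List.length_cons, List.length_nil] at hbr ⊢; omega
        simp only [if_pos hbr, hlen, List.take_succ_cons, List.take_zero]
        constructor
        · simp
        · intro habs
          exfalso
          simp only [List.length_cons] at habs
          omega
      · simp only [if_neg hbr]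
        have h' : (((tube ++ [c]).length : Nat) : Int) < t := by
          simp only [List.length_append, List.length_cons, List.length_nil] at hbr ⊢
          push_cast at hbr ⊢; omega
        obtain ⟨ih1, ih2⟩ := ih (tube ++ [c]) (pvStep m ord) h'
        have hT : t.toNat - tube.length = (t.toNat - (tube ++ [c]).length) + 1 := by
          simp only [List.length_append, List.length_cons, List.length_nil] at h' ⊢
          omega
        constructor
        · rw [ih1, hT, List.take_succ_cons]
          simp
        · intro hlt
          rw [ih2 (by simp at hlt ⊢; omega)]
          simp [pvOrdAfter]
    · simp only [pvInner, hp, Bool.false_eq_true, if_false, pvSel, List.nil_append]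
      obtain ⟨ih1, ih2⟩ := ih tube (pvStep m ord) h
      exact ⟨ih1, fun hlt => by rw [ih2 hlt]; simp [pvOrdAfter]⟩

theorem pvOuter_stop (n t m p : Int) (fuel : Nat) (tube : List Char) (k ord : Int)
    (h : ¬ (tube.length : Int) < t) : pvOuter n t m p fuel tube k ord = tube := by
  cases fuel <;> simp [pvOuter, h]

theorem pvStep_ordOfD_zero (m p : Int) (hp1 : 1 ≤ p) (hpm : p ≤ m) :
    pvStep m (pvOrdOfD m p 0) = pvOrdOfD m p (m.toNat - 1) := by
  have hm : 0 < m := by omega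
  have hmod : ∀ a : Int, PySem.Int.mod a m = a % m := fun a => PySem.Int.mod_eq_emod_of_pos hm
  have h0 : pvOrdOfD m p 0 = p := by simp only [pvOrdOfD]; split_ifs <;> omega
  rw [h0]
  simp only [pvStep, hmod]
  by_cases hpm' : p = m
  · subst hpm'
    have h1 : (p + 1) % p = 1 % p := by
      rw [show p + 1 = 1 + p * 1 by ring, Int.add_mul_emod_self_left]
    by_cases hp1' : p = 1
    · subst hp1'; norm_num [pvOrdOfD]
    · have h2 : (1 : Int) % p = 1 := Int.emod_eq_of_lt (by omega) (by omega)
      rw [h1, h2]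
      simp only [beq_iff_eq, if_neg (by omega : ¬ (1:Int) = 0)]
      simp only [pvOrdOfD]
      split_ifs <;> omega
  · by_cases hom : p + 1 = m
    · rw [hom, Int.emod_self]
      simp only [beq_iff_eq, if_pos rfl]
      simp only [pvOrdOfD]
      split_ifs <;> omega
    · have h2 : (p + 1) % m = p + 1 := Int.emod_eq_of_lt (by omega) (by omega)
      rw [h2]
      simp only [beq_iff_eq, if_neg (by omega : ¬ p + 1 = 0)]
      simp only [pvOrdOfD]
      split_ifs <;> omega

theorem pvStep_ordOfD_succ (m p : Int) (hp1 : 1 ≤ p) (hpm : p ≤ m) (d : Nat) (hd0 : d ≠ 0)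
    (hd : d < m.toNat) : pvStep m (pvOrdOfD m p d) = pvOrdOfD m p (d - 1) := by
  have hm : 0 < m := by omega
  have hmod : ∀ a : Int, PySem.Int.mod a m = a % m := fun a => PySem.Int.mod_eq_emod_of_pos hm
  simp only [pvStep, hmod]
  by_cases hb : (d : Int) ≤ p - 1
  · -- ord = p - d, 1 ≤ ord ≤ p - 1; o = p - d + 1 ∈ [2, p] ⊆ [2, m]
    rw [show pvOrdOfD m p d = p - d by simp only [pvOrdOfD]; split_ifs <;> omega]
    by_cases hom : p - (d : Int) + 1 = m
    · rw [hom, Int.emod_self]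
      simp only [beq_iff_eq, if_pos rfl]
      simp only [pvOrdOfD]
      split_ifs <;> omega
    · have h2 : (p - d + 1) % m = p - d + 1 := Int.emod_eq_of_lt (by omega) (by omega)
      rw [h2]
      simp only [beq_iff_eq, if_neg (by omega : ¬ p - (d:Int) + 1 = 0)]
      simp only [pvOrdOfD]
      split_ifs <;> omega
  · -- ord = p + m - d with p ≤ d < m
    push_neg at hb
    rw [show pvOrdOfD m p d = p + m - d by simp only [pvOrdOfD]; split_ifs <;> omega]
    by_cases hdp : (d : Int) = p
    · -- o = m + 1
      have h1 : (p + m - d + 1) % m = 1 % m := by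
        rw [show p + m - (d:Int) + 1 = 1 + m * 1 by rw [← hdp]; ring, Int.add_mul_emod_self_left]
      have hm2 : 2 ≤ m := by omega
      have h2 : (1 : Int) % m = 1 := Int.emod_eq_of_lt (by omega) (by omega)
      rw [h1, h2]
      simp only [beq_iff_eq, if_neg (by omega : ¬ (1:Int) = 0)]
      simp only [pvOrdOfD]
      split_ifs <;> omega
    · by_cases hom : p + m - (d : Int) + 1 = m
      · rw [hom, Int.emod_self]
        simp only [beq_iff_eq, if_pos rfl]
        simp only [pvOrdOfD]
        split_ifs <;> omega
      · have h2 : (p + m - d + 1) % m = p + m - d + 1 := Int.emod_eq_of_lt (by omega) (by omega)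
        rw [h2]
        simp only [beq_iff_eq, if_neg (by omega : ¬ p + m - (d:Int) + 1 = 0)]
        simp only [pvOrdOfD]
        split_ifs <;> omega

theorem pvOrdOfD_eq_p_iff (m p : Int) (hp1 : 1 ≤ p) (hpm : p ≤ m) (d : Nat) (hd : d < m.toNat) :
    pvOrdOfD m p d = p ↔ d = 0 := by
  simp only [pvOrdOfD]
  split_ifs with h <;> omega

theorem pvSel_get? (m p : Int) (hp1 : 1 ≤ p) (hpm : p ≤ m) :
    ∀ (cs : List Char) (d j : Nat), d < m.toNat →
    (pvSel m p (pvOrdOfD m p d) cs)[j]? = cs[d + j * m.toNat]? := by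
  intro cs
  induction cs with
  | nil => intro d j hd; simp [pvSel]
  | cons c cs ih =>
    intro d j hd
    have hM : 1 ≤ m.toNat := by omega
    by_cases hd0 : d = 0
    · subst hd0
      have hpe : (pvOrdOfD m p 0 == p) = true := by
        simp [beq_iff_eq, (pvOrdOfD_eq_p_iff m p hp1 hpm 0 hd).mpr rfl]
      simp only [pvSel, hpe, if_pos, List.singleton_append]
      rw [pvStep_ordOfD_zero m p hp1 hpm]
      cases j with
      | zero => simp
      | succ j' =>
        rw [List.getElem?_cons_succ, ih (m.toNat - 1) j' (by omega),
          show 0 + (j' + 1) * m.toNat = ((m.toNat - 1) + j' * m.toNat) + 1 from by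
            rw [Nat.succ_mul]; omega,
          List.getElem?_cons_succ]
    · have hpe : (pvOrdOfD m p d == p) = false := by
        simp [beq_iff_eq]
        intro h
        exact hd0 ((pvOrdOfD_eq_p_iff m p hp1 hpm d hd).mp h)
      simp only [pvSel, hpe, Bool.false_eq_true, if_false, List.nil_append]
      rw [pvStep_ordOfD_succ m p hp1 hpm d hd0 hd]
      have hidx : d + j * m.toNat = (d - 1 + j * m.toNat) + 1 := by omega
      rw [hidx, ih (d - 1) j (by omega), List.getElem?_cons_succ]

theorem pvOrdOfD_P (m p : Int) (hp1 : 1 ≤ p) :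
    pvOrdOfD m p (p - 1).toNat = 1 := by
  simp only [pvOrdOfD]
  rw [if_pos (by omega)]
  omega

-- if the stream has at least p + (t-1)m digits, it contains at least t picks
theorem pvPicks_len (m p : Int) (hp1 : 1 ≤ p) (hpm : p ≤ m) (cs : List Char) (T : Nat) (hT : 1 ≤ T)
    (hlen : (p - 1).toNat + (T - 1) * m.toNat + 1 ≤ cs.length) :
    T ≤ (pvSel m p 1 cs).length := by
  have hP : (p - 1).toNat < m.toNat := by omega
  have h := pvSel_get? m p hp1 hpm cs (p - 1).toNat (T - 1) hP
  rw [pvOrdOfD_P m p hp1] at h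
  have hsome : (pvSel m p 1 cs)[T - 1]?.isSome := by
    rw [h]; simp; omega
  have hlt : T - 1 < (pvSel m p 1 cs).length := by simpa using hsome
  omega

-- A's outer loop computes the first t picks of the digit stream
theorem pvOuter_spec (n t m p : Int) (hn2 : 2 ≤ n) (hn16 : n ≤ 16) (ht : 1 ≤ t)
    (hp1 : 1 ≤ p) (hpm : p ≤ m) :
    ∀ (fuel k : Nat),
    (pvSel m p 1 (pvLL n k)).length < t.toNat →
    (p - 1).toNat + (t.toNat - 1) * m.toNat + 1 ≤ (pvLL n k).length + fuel →
    ∃ K : Nat,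
      pvOuter n t m p fuel (pvSel m p 1 (pvLL n k)) (k : Int) (pvOrdAfter m 1 (pvLL n k))
        = (pvSel m p 1 (pvLL n K)).take t.toNat
      ∧ t.toNat ≤ (pvSel m p 1 (pvLL n K)).length := by
  intro fuel
  induction fuel with
  | zero =>
    intro k hlt hfuel
    exfalso
    have := pvPicks_len m p hp1 hpm (pvLL n k) t.toNat (by omega) (by omega)
    omega
  | succ fuel ih =>
    intro k hlt hfuel
    have hT1 : 1 ≤ t.toNat := by omega
    have hcond : ((pvSel m p 1 (pvLL n k)).length : Int) < t := by omega
    simp only [pvOuter, if_pos hcond]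
    obtain ⟨h1, h2⟩ := pvInner_spec t m p ht (pvConvA (k : Int) n) (pvSel m p 1 (pvLL n k))
      (pvOrdAfter m 1 (pvLL n k)) hcond
    have hsel : pvSel m p 1 (pvLL n (k + 1))
        = pvSel m p 1 (pvLL n k) ++ pvSel m p (pvOrdAfter m 1 (pvLL n k)) (pvConvA (k : Int) n) := by
      rw [pvLL_succ, pvSel_append]
    by_cases hfill :
        (pvSel m p 1 (pvLL n k)).length
          + (pvSel m p (pvOrdAfter m 1 (pvLL n k)) (pvConvA (k : Int) n)).length < t.toNat
    · -- not filled: the whole pick list of number k was appended, recurse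
      have h2' := h2 hfill
      have htube : (pvInner t m p (pvConvA (k : Int) n) (pvSel m p 1 (pvLL n k))
          (pvOrdAfter m 1 (pvLL n k))).1 = pvSel m p 1 (pvLL n (k + 1)) := by
        rw [h1, hsel]
        congr 1
        exact List.take_of_length_le (by omega)
      have hord : (pvInner t m p (pvConvA (k : Int) n) (pvSel m p 1 (pvLL n k))
          (pvOrdAfter m 1 (pvLL n k))).2 = pvOrdAfter m 1 (pvLL n (k + 1)) := by
        rw [h2', pvLL_succ, pvOrdAfter_append]
      rw [htube, hord]
      have hlen1 : (pvLL n k).length + 1 ≤ (pvLL n (k + 1)).length := by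
        rw [pvLL_succ, List.length_append]
        have := pvConvA_len n hn2 hn16 (k : Int) (by positivity)
        omega
      have hk1 : ((k : Int) + 1) = ((k + 1 : Nat) : Int) := by push_cast; ring
      rw [hk1]
      apply ih (k + 1) (by rw [hsel, List.length_append]; omega) (by omega)
    · -- filled: tube reaches length t, next iteration exits
      push_neg at hfill
      have hres : (pvInner t m p (pvConvA (k : Int) n) (pvSel m p 1 (pvLL n k))
          (pvOrdAfter m 1 (pvLL n k))).1 = (pvSel m p 1 (pvLL n (k + 1))).take t.toNat := by
        have htk : List.take t.toNat (pvSel m p 1 (pvLL n k)) = pvSel m p 1 (pvLL n k) :=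
          List.take_of_length_le (Nat.le_of_lt hlt)
        rw [h1, hsel, List.take_append, htk]
      have hlenres : ((pvSel m p 1 (pvLL n (k + 1))).take t.toNat).length = t.toNat := by
        rw [List.length_take, hsel, List.length_append]
        omega
      refine ⟨k + 1, ?_, by rw [hsel, List.length_append]; omega⟩
      rw [hres, pvOuter_stop]
      rw [hlenres]
      omega

-- B's generation loop produces a digit-stream prefix of length ≥ need
theorem pvBuild_spec (n t m p : Int) (hn2 : 2 ≤ n) (hn16 : n ≤ 16) :
    ∀ (fuel k : Nat) (need : Int),
    need ≤ ((pvLL n k).length : Int) + fuel →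
    ∃ K : Nat, pvBuild n need fuel (pvLL n k) (k : Int) = pvLL n K
      ∧ need ≤ ((pvLL n K).length : Int) := by
  intro fuel
  induction fuel with
  | zero =>
    intro k need h
    exact ⟨k, by simp [pvBuild], by omega⟩
  | succ fuel ih =>
    intro k need h
    simp only [pvBuild]
    by_cases hc : ((pvLL n k).length : Int) < need
    · rw [if_pos hc]
      rw [← pvConv_eq n hn2 hn16 (k : Int) (by positivity), ← pvLL_succ]
      have hlen1 : (pvLL n k).length + 1 ≤ (pvLL n (k + 1)).length := by
        rw [pvLL_succ, List.length_append]
        have := pvConvA_len n hn2 hn16 (k : Int) (by positivity)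
        omega
      have hk1 : ((k : Int) + 1) = ((k + 1 : Nat) : Int) := by push_cast; ring
      rw [hk1]
      exact ih (k + 1) need (by omega)
    · rw [if_neg hc]
      exact ⟨k, rfl, by omega⟩

-- ===== VERDICT helper: the full equivalence on the nontrivial branch =====
theorem pv_main (n t m p : Int) (hn2 : 2 ≤ n) (hn16 : n ≤ 16) (ht : 1 ≤ t)
    (hp1 : 1 ≤ p) (hpm : p ≤ m) : solution n t m p = solution_alt n t m p := by
  have hT1 : 1 ≤ t.toNat := by omega
  have hM1 : 1 ≤ m.toNat := by omega
  have hP : (p - 1).toNat < m.toNat := by omega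
  have hneed : (p + (t - 1) * m).toNat = (p - 1).toNat + (t.toNat - 1) * m.toNat + 1 := by
    have h : p + (t - 1) * m = (((p - 1).toNat + (t.toNat - 1) * m.toNat + 1 : Nat) : Int) := by
      push_cast
      have e1 : (((p - 1).toNat : Nat) : Int) = p - 1 := by omega
      have e2 : (((t.toNat - 1 : Nat) : Nat) : Int) = t - 1 := by omega
      have e3 : ((m.toNat : Nat) : Int) = m := by omega
      rw [e1, e2, e3]; ring
    rw [h, Int.toNat_natCast]
  have hL0 : pvLL n 0 = [] := by simp [pvLL]
  -- A side
  obtain ⟨KA, hA, hALen⟩ := pvOuter_spec n t m p hn2 hn16 ht hp1 hpm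
    ((p + (t - 1) * m).toNat + 1) 0 (by rw [hL0]; simpa [pvSel] using (by omega : 0 < t.toNat))
    (by rw [hneed, hL0]; simp)
  -- B side
  obtain ⟨KB, hB, hBLen⟩ := pvBuild_spec n t m p hn2 hn16 ((p + (t - 1) * m).toNat + 1) 0
    (p + (t - 1) * m) (by rw [hL0]; simp; omega)
  have hBLen' : (p - 1).toNat + (t.toNat - 1) * m.toNat + 1 ≤ (pvLL n KB).length := by
    have hcast : p + (t - 1) * m
        = (((p - 1).toNat + (t.toNat - 1) * m.toNat + 1 : Nat) : Int) := by
      rw [← hneed]; omega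
    rw [hcast] at hBLen
    exact_mod_cast hBLen
  simp only [hL0, Nat.cast_zero] at hA hB
  have hS0 : pvSel m p 1 ([] : List Char) = [] := rfl
  have hO0 : pvOrdAfter m 1 ([] : List Char) = 1 := rfl
  rw [hS0, hO0] at hA
  -- unfold both programs
  simp only [solution, solution_alt, if_neg (by omega : ¬ t ≤ 0)]
  rw [hA, hB]
  congr 1
  simp only [PySem.List.pyRange_one, sub_zero, List.map_map]
  apply List.ext_getElem?
  intro j
  by_cases hj : j < t.toNat
  · -- entry j of both lists is digit P + j*M of the stream
    have hidxA := pvSel_get? m p hp1 hpm (pvLL n KA) (p - 1).toNat j hP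
    rw [pvOrdOfD_P m p hp1] at hidxA
    rw [List.getElem?_take_of_lt hj, hidxA, List.getElem?_map, List.getElem?_range hj]
    have hidxBound : (p - 1).toNat + j * m.toNat
        < (p - 1).toNat + (t.toNat - 1) * m.toNat + 1 := by
      have : j * m.toNat ≤ (t.toNat - 1) * m.toNat := Nat.mul_le_mul_right _ (by omega)
      omega
    have hinA : (p - 1).toNat + j * m.toNat < (pvLL n KA).length := by
      have hsomeA : (pvLL n KA)[(p - 1).toNat + j * m.toNat]?.isSome := by
        rw [← hidxA]
        simp
        omega
      simpa using hsomeA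
    have hinB : (p - 1).toNat + j * m.toNat < (pvLL n KB).length := by omega
    have hcommon : (pvLL n KA)[(p - 1).toNat + j * m.toNat]?
        = (pvLL n KB)[(p - 1).toNat + j * m.toNat]? := by
      by_cases hKK : KA ≤ KB
      · rw [pvPrefix_get? (pvLL_prefix n hKK) hinA]
      · rw [pvPrefix_get? (pvLL_prefix n (by omega : KB ≤ KA)) hinB]
    rw [hcommon, List.getElem?_eq_getElem hinB]
    simp only [Option.map_some, Function.comp_apply, zero_add]
    have hcast : p - 1 + ((j : Nat) : Int) * m = (((p - 1).toNat + j * m.toNat : Nat) : Int) := by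
      push_cast
      have e1 : (((p - 1).toNat : Nat) : Int) = p - 1 := by omega
      have e3 : ((m.toNat : Nat) : Int) = m := by omega
      rw [e1, e3]
    rw [hcast, PySem.List.pyGet?_natCast, List.getElem?_eq_getElem hinB]
    simp
  · -- beyond t digits: both lists have length t.toNat
    refine (List.getElem?_eq_none ?_).trans (List.getElem?_eq_none ?_).symm
    · rw [List.length_take]; omega
    · simp
      omega

-- ===== VERDICT (by name: the statement is the Claim_ definition above) =====
theorem solution_spec : Claim_equal_solution := by
  intro n t m p hdom hpre
  unfold Spec_solution
  by_cases ht : t ≤ 0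
  · -- A: the while condition is false at once; B: the t ≤ 0 branch
    simp only [solution, solution_alt, if_pos ht]
    rw [pvOuter]
    simp only [List.length_nil, Int.natCast_zero, if_neg (by omega : ¬ (0 : Int) < t)]
  · rcases hpre with h | ⟨hn2, hn16, hp1, hpm⟩
    · omega
    · exact pv_main n t m p hn2 hn16 (by omega) hp1 hpm
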